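-- pv_equiv track=rewrite | github.com/xflr6/bitsets | bitsets/combos.py | shortlex
-- ===== SOURCE A (Python) =====
-- import collections
--
-- def shortlex(start, other, excludestart=False):
--     """Yield all unions of start with other in shortlex order.
--
--     >>> ['{:03b}'.format(s) for s in shortlex(0, [0b100, 0b010, 0b001])]
--     ['000', '100', '010', '001', '110', '101', '011', '111']
--
--     >>> ', '.join(''.join(sorted(s))
--     ... for s in shortlex(set(), [{'a'}, {'b'}, {'c'}, {'d'}]))
--     ', a, b, c, d, ab, ac, ad, bc, bd, cd, abc, abd, acd, bcd, abcd'
--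
--     >>> assert list(shortlex(set(), [{1}, {2}], excludestart=True)) == \
--         [{1}, {2}, {1, 2}]
--     """
--     if not excludestart:
--         yield start
--
--     queue = collections.deque([(start, other)])
--
--     while queue:
--         current, other = queue.popleft()
--
--         while other:
--             first, other = other[0], other[1:]
--             result = current | first
--
--             yield result
--
--             if other:
--                 queue.append((result, other))
-- ===== SOURCE B (Python) =====
-- def shortlex(start, other, excludestart=False):
--     """Yield all unions of start with other in shortlex order."""
--     if not excludestart:
--         yield start
--
--     n = len(other)
--
--     def unions(acc, i, k):
--         # list of acc OR-ed with every k-subset of other[i:], in positional lex order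
--         if k == 0:
--             return [acc]
--         if n - i < k:
--             return []
--         return unions(acc | other[i], i + 1, k - 1) + unions(acc, i + 1, k)
--
--     for r in range(n):
--         yield from unions(start, 0, r + 1)
-- ===== Notes on version B (the rewrite author's own statement) =====
-- stated objective: idiomatic
-- what changed: Replaces A's deque-based BFS over (current, remaining-suffix) queue states with a direct enumeration of combinations of 'other' grouped by increasing cardinality, folding each combination onto start with bitwise or.
import Mathlib
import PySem

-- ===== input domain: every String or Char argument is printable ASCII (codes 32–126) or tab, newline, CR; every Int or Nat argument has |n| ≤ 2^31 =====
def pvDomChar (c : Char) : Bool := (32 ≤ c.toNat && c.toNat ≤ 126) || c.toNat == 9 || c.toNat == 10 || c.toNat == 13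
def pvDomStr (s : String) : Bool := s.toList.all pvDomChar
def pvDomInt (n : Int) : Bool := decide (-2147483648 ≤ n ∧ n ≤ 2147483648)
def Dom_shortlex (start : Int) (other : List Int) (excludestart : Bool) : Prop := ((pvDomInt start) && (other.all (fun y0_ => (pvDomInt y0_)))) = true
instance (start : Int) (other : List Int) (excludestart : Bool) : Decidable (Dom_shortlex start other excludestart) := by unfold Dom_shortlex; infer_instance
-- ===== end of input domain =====

-- B replaces A's deque-based BFS with a direct enumeration of combinations grouped by
-- increasing cardinality (objective: simpler/idiomatic; same output order, not claimed faster).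

-- ===== PORT A =====
-- inner while loop of A: current fixed, consume 'other'; returns (yields, queue appends)
def pvInner (c : Int) : List Int → List Int × List (Int × List Int)
  | [] => ([], [])
  | x :: xs =>
    let r := PySem.Int.bor c x
    let (ys, as_) := pvInner c xs
    (r :: ys, (if xs.isEmpty then [] else [(r, xs)]) ++ as_)

-- weight for termination of the FIFO loop
def pvW (q : List (Int × List Int)) : Nat := (q.map (fun e => 2 ^ e.2.length)).sum

theorem pvInner_snd_W (c : Int) (o : List Int) :
    pvW (pvInner c o).2 + 1 ≤ 2 ^ o.length := by
  induction o with
  | nil => simp [pvInner, pvW]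
  | cons x xs ih =>
    have hx : (pvInner c (x :: xs)).2
        = (if xs.isEmpty then [] else [(PySem.Int.bor c x, xs)]) ++ (pvInner c xs).2 := rfl
    have hlen : 2 ^ (x :: xs).length = 2 * 2 ^ xs.length := by
      simp [List.length_cons, pow_succ, Nat.mul_comm]
    rw [hx, hlen]
    by_cases h : xs.isEmpty
    · simp only [h, if_pos, List.nil_append]
      omega
    · have : pvW ([(PySem.Int.bor c x, xs)] ++ (pvInner c xs).2)
          = 2 ^ xs.length + pvW (pvInner c xs).2 := by simp [pvW]
      rw [if_neg (by simpa using h), this]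
      omega

-- outer while loop of A: FIFO queue processing
def pvOuter : List (Int × List Int) → List Int
  | [] => []
  | (c, o) :: q =>
    let p := pvInner c o
    p.1 ++ pvOuter (q ++ p.2)
termination_by q => pvW q
decreasing_by
  simp only [pvW, List.map_append, List.sum_append, List.map_cons, List.sum_cons]
  have := pvInner_snd_W c o
  unfold pvW at this
  omega

def shortlex (start : Int) (other : List Int) (excludestart : Bool) : List Int :=
  (if excludestart then [] else [start]) ++ pvOuter [(start, other)]

-- ===== PORT B =====
-- Source B's recursive unions(acc, i, k): acc OR-ed with every k-subset of other[i:], positional lex order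
-- (other[i] is ported as getD; the guard n - i ≥ k > 0 keeps i in bounds, as in the Python)
def pvUnions (other : List Int) (acc : Int) (i : Nat) (k : Nat) : List Int :=
  if k = 0 then [acc]
  else if other.length - i < k then []
  else pvUnions other (PySem.Int.bor acc (other.getD i 0)) (i + 1) (k - 1)
        ++ pvUnions other acc (i + 1) k
termination_by other.length - i
decreasing_by all_goals omega

def shortlex_alt (start : Int) (other : List Int) (excludestart : Bool) : List Int :=
  (if excludestart then [] else [start]) ++
    (List.range other.length).flatMap (fun r => pvUnions other start 0 (r + 1))

-- ===== PRECONDITION & SPEC =====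
def Spec_shortlex (start : Int) (other : List Int) (excludestart : Bool) (out : List Int) : Prop := out = shortlex_alt start other excludestart
instance (start : Int) (other : List Int) (excludestart : Bool) (out : List Int) : Decidable (Spec_shortlex start other excludestart out) := by unfold Spec_shortlex; infer_instance

-- ===== CLAIM (what is proved, stated in full; the proofs are below) =====
def Claim_equal_shortlex : Prop := ∀ (start : Int) (other : List Int) (excludestart : Bool), Dom_shortlex start other excludestart → Spec_shortlex start other excludestart (shortlex start other excludestart)

-- ===== LEMMAS AND PROOFS =====

-- proof-side: combinations of xs of size k, in positional lexicographic order
def pvCombos : Nat → List Int → List (List Int)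
  | 0, _ => [[]]
  | _ + 1, [] => []
  | k + 1, x :: xs => (pvCombos k xs).map (fun c => x :: c) ++ pvCombos (k + 1) xs

-- level k output contributed by a queue entry: unions of (k+1)-subsets of its suffix
def pvL (e : Int × List Int) (k : Nat) : List Int :=
  (pvCombos (k + 1) e.2).map (fun combo => combo.foldl (fun res v => PySem.Int.bor res v) e.1)

theorem pvCombos_nil_of_lt (k : Nat) (xs : List Int) (h : xs.length < k) : pvCombos k xs = [] := by
  induction xs generalizing k with
  | nil => cases k with | zero => omega | succ k => rfl
  | cons x xs ih =>
    cases k with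
    | zero => omega
    | succ k =>
      simp only [List.length_cons] at h
      simp [pvCombos, ih k (by omega), ih (k+1) (by omega)]

theorem pvL_nil_of_le (e : Int × List Int) (k : Nat) (h : e.2.length ≤ k) : pvL e k = [] := by
  simp [pvL, pvCombos_nil_of_lt (k+1) e.2 (by omega)]

theorem pvInner_fst (c : Int) (o : List Int) : (pvInner c o).1 = pvL (c, o) 0 := by
  induction o with
  | nil => rfl
  | cons x xs ih =>
    simp only [pvInner, pvL, pvCombos, List.map_append, List.map_map]
    simp only [pvL] at ih
    simp [← ih]

theorem pvInner_snd_L (c : Int) (o : List Int) (k : Nat) :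
    (pvInner c o).2.flatMap (fun e => pvL e k) = pvL (c, o) (k + 1) := by
  induction o with
  | nil => simp [pvInner, pvL, pvCombos]
  | cons x xs ih =>
    simp only [pvInner, List.flatMap_append]
    rw [ih]
    by_cases hxs : xs = []
    · subst hxs
      simp [pvL, pvCombos]
    · simp only [List.isEmpty_eq_false_iff.mpr hxs, if_neg Bool.false_ne_true,
        List.flatMap_cons, List.flatMap_nil, List.append_nil]
      show pvL (PySem.Int.bor c x, xs) k ++ pvL (c, xs) (k+1) = pvL (c, x :: xs) (k+1)
      simp only [pvL, pvCombos, List.map_append, List.map_map]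
      congr 1

-- generic reshuffling of level streams under ++
theorem pvShift {α : Type} (N : Nat) (f g : Nat → List α) :
    (List.range N).flatMap (fun k => f k ++ g k) ++ f N
      = f 0 ++ (List.range N).flatMap (fun k => g k ++ f (k + 1)) := by
  induction N with
  | zero => simp
  | succ N ih =>
    simp only [List.range_succ, List.flatMap_append, List.flatMap_cons, List.flatMap_nil,
      List.append_nil] at *
    calc (List.range N).flatMap (fun k => f k ++ g k) ++ (f N ++ g N) ++ f (N + 1)
        = ((List.range N).flatMap (fun k => f k ++ g k) ++ f N) ++ (g N ++ f (N + 1)) := by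
          simp [List.append_assoc]
      _ = f 0 ++ (List.range N).flatMap (fun k => g k ++ f (k + 1)) ++ (g N ++ f (N + 1)) := by
          rw [ih]
      _ = _ := by simp [List.append_assoc]

def pvLevels (N : Nat) (q : List (Int × List Int)) : List Int :=
  (List.range N).flatMap (fun k => q.flatMap (fun e => pvL e k))

theorem pvInner_snd_len (c : Int) (o : List Int) :
    ∀ e ∈ (pvInner c o).2, e.2.length < o.length := by
  induction o with
  | nil => simp [pvInner]
  | cons x xs ih =>
    intro e he
    simp only [pvInner, List.mem_append] at he
    rcases he with he | he
    · split at he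
      · simp at he
      · simp only [List.mem_singleton] at he
        subst he
        simp
    · have := ih e he
      simp only [List.length_cons]
      omega

theorem pvOuter_levels (q : List (Int × List Int)) (N : Nat)
    (hb : ∀ e ∈ q, e.2.length ≤ N) : pvOuter q = pvLevels N q := by
  induction hq : pvW q using Nat.strong_induction_on generalizing q with
  | _ w ih =>
  cases q with
  | nil => simp [pvOuter, pvLevels]
  | cons e q =>
    obtain ⟨c, o⟩ := e
    rw [pvOuter]
    have hlen : o.length ≤ N := hb (c, o) (List.mem_cons_self)
    have hdec : pvW (q ++ (pvInner c o).2) < w := by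
      subst hq
      simp only [pvW, List.map_append, List.sum_append, List.map_cons, List.sum_cons]
      have := pvInner_snd_W c o
      unfold pvW at this
      omega
    have hb' : ∀ e ∈ q ++ (pvInner c o).2, e.2.length ≤ N := by
      intro e he
      rcases List.mem_append.mp he with he | he
      · exact hb e (List.mem_cons_of_mem _ he)
      · exact le_trans (le_of_lt (pvInner_snd_len c o e he)) hlen
    rw [ih _ hdec (q ++ (pvInner c o).2) hb' rfl]
    -- now pure level algebra
    simp only [pvLevels, List.flatMap_cons, List.flatMap_append]
    have key := pvShift N (fun k => pvL (c, o) k) (fun k => q.flatMap (fun e => pvL e k))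
    rw [pvL_nil_of_le (c, o) N hlen, List.append_nil] at key
    rw [pvInner_fst, key]
    congr 1
    apply List.flatMap_congr
    intro k _
    rw [pvInner_snd_L]

theorem pvUnions_eq (other : List Int) (acc : Int) (i k : Nat) :
    pvUnions other acc i k
      = (pvCombos k (other.drop i)).map (fun c => c.foldl (fun res v => PySem.Int.bor res v) acc) := by
  induction hm : other.length - i using Nat.strong_induction_on generalizing acc i k with
  | _ m ih =>
  rw [pvUnions]
  by_cases hk : k = 0
  · subst hk; simp [pvCombos]
  · rw [if_neg hk]
    by_cases hlt : other.length - i < k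
    · rw [if_pos hlt]
      rw [pvCombos_nil_of_lt k (other.drop i) (by simp [List.length_drop]; omega)]
      simp
    · rw [if_neg hlt]
      have hi : i < other.length := by omega
      have hdrop : other.drop i = other[i] :: other.drop (i + 1) :=
        List.drop_eq_getElem_cons hi
      have hgetD : other.getD i 0 = other[i] := by
        simp [List.getD, List.getElem?_eq_getElem hi]
      obtain ⟨k', rfl⟩ : ∃ k', k = k' + 1 := ⟨k - 1, by omega⟩
      rw [hdrop]
      simp only [pvCombos, List.map_append, List.map_map, Nat.add_sub_cancel]
      rw [ih (other.length - (i + 1)) (by omega) _ (i + 1) k' rfl,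
          ih (other.length - (i + 1)) (by omega) _ (i + 1) (k' + 1) rfl, hgetD]
      congr 1

theorem pvLevels_single (start : Int) (other : List Int) :
    pvLevels other.length [(start, other)]
      = (List.range other.length).flatMap (fun r => pvUnions other start 0 (r + 1)) := by
  simp [pvLevels, pvL, pvUnions_eq]

-- ===== VERDICT (by name: the statement is the Claim_ definition above) =====
theorem shortlex_spec : Claim_equal_shortlex := by
  intro start other excludestart _
  unfold Spec_shortlex shortlex shortlex_alt
  rw [pvOuter_levels [(start, other)] other.length (by simp), pvLevels_single]
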